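-- pv_equiv track=rewrite | github.com/yammesicka/advent | 2019/6/pretty.py | map_flatter
-- ===== SOURCE A (Python) =====
-- import functools
-- from typing import Dict, Iterable, List
--
-- def map_flatter(starmap: Dict[str, List[str]]) -> Dict[str, List[str]]:
--     @functools.lru_cache(maxsize=None)
--     def flat_map(start: str) -> List[str]:
--         if start not in starmap:
--             return []
--         stars = [s for star in starmap[start] for s in flat_map(star)]
--         return starmap[start] + stars
--     return {star: flat_map(star) for star in starmap}
-- ===== SOURCE B (Python) =====
-- def map_flatter(starmap):
--     # Bottom-up sweeps: repeatedly fill desc[node] once all of node's in-map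
--     # children are already filled (children absent from the map contribute []);
--     # stop as soon as a sweep makes no progress.
--     desc = {}
--     for _ in range(len(starmap)):
--         progress = False
--         for node in starmap:
--             if node in desc:
--                 continue
--             children = starmap[node]
--             if all(c in desc or c not in starmap for c in children):
--                 desc[node] = children + [d for c in children for d in desc.get(c, [])]
--                 progress = True
--         if not progress:
--             break
--     return {node: desc[node] for node in starmap}
-- ===== Notes on version B (the rewrite author's own statement) =====
-- stated objective: alternative
-- what changed: A's memoised top-down recursion (lru_cache'd flat_map) is replaced by an iterative bottom-up dynamic-programming fill: repeated sweeps over the keys insert desc[node] = children + concatenated desc of the in-map children once all of those are already filled, then the result dict is read off.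
import Mathlib
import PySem

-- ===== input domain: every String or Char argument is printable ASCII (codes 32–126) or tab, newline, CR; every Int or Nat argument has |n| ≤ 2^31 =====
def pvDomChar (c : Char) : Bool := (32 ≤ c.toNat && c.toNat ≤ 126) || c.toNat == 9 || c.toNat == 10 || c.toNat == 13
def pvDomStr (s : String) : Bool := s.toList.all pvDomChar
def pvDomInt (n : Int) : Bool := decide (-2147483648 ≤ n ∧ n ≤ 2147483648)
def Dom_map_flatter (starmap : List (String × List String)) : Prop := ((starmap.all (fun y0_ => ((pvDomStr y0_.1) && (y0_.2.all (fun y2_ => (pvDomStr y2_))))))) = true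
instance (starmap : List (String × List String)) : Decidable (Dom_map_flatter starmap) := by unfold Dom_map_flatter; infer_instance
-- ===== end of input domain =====

-- B replaces A's memoised top-down recursion by an iterative bottom-up
-- dynamic-programming fill over sweeps (objective: alternative decomposition).

-- ===== PORT A =====
-- flat_map with fuel: under Pre_ (acyclic graph) every recursion chain passes
-- through distinct keys, so fuel starmap.length+1 never runs out.
def flatA (sm : PySem.Dict String (List String)) : Nat → String → List String
  | 0, _ => []
  | n+1, start =>
    match sm.get? start with
    | none => []      -- `if start not in starmap: return []`
    | some cs => cs ++ cs.flatMap (fun star => flatA sm n star)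

def map_flatter (starmap : List (String × List String)) : List (String × List String) :=
  let sm := PySem.Dict.mk starmap
  (sm.keys.foldl (fun d k => d.insert k (flatA sm (starmap.length + 1) k))
      PySem.Dict.empty).items

-- ===== PORT B =====
-- one step of the inner `for node in starmap` loop of Source B, carrying the
-- `progress` flag in the state
def stepB2 (sm : PySem.Dict String (List String))
    (st : PySem.Dict String (List String) × Bool) (node : String) :
    PySem.Dict String (List String) × Bool :=
  if (st.1.get? node).isSome then st
  else
    let cs := (sm.get? node).getD []
    if cs.all (fun c => (st.1.get? c).isSome || (sm.get? c).isNone)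
    then (st.1.insert node (cs ++ cs.flatMap (fun c => (st.1.get? c).getD [])), true)
    else st

def map_flatter_alt (starmap : List (String × List String)) : List (String × List String) :=
  let sm := PySem.Dict.mk starmap
  -- outer loop state: (desc, stopped); Source B's `break` is modelled by the stopped flag
  let st := (List.range starmap.length).foldl
    (fun st _ => if st.2 then st
      else
        let r := sm.keys.foldl (stepB2 sm) (st.1, false)
        (r.1, !r.2))
    (PySem.Dict.empty, false)
  let desc := st.1
  -- Python's final `desc[node]` raises KeyError only on cyclic input (outside Pre_);
  -- getD [] makes the port total.
  (sm.keys.foldl (fun out k => out.insert k ((desc.get? k).getD [])) PySem.Dict.empty).items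

-- ===== PRECONDITION & SPEC =====
-- in-map children of x
def chF (sm : PySem.Dict String (List String)) (x : String) : Finset String :=
  (((sm.get? x).getD []).filter (fun c => (sm.get? c).isSome)).toFinset

def growF (sm : PySem.Dict String (List String)) (S : Finset String) : Finset String :=
  S ∪ S.biUnion (chF sm)

-- keys reachable from x (closure; fuel sm.size suffices to saturate)
def reachF (sm : PySem.Dict String (List String)) (x : String) : Finset String :=
  (growF sm)^[sm.size] (chF sm x)

-- Pre_: keys pairwise distinct (automatic for a Python dict, which this assoc list
-- encodes) and the child graph acyclic: on a cycle A's recursion never returns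
-- (RecursionError) and B raises KeyError in its final comprehension.
def Pre_map_flatter (starmap : List (String × List String)) : Prop :=
  (starmap.map Prod.fst).Nodup ∧
  ∀ k ∈ starmap.map Prod.fst, k ∉ reachF (PySem.Dict.mk starmap) k

instance (starmap : List (String × List String)) : Decidable (Pre_map_flatter starmap) := by
  unfold Pre_map_flatter; infer_instance

def pvWitness_map_flatter : (List (String × List String)) :=
  [("COM", ["B", "C"]), ("B", ["C"]), ("C", [])]

def Spec_map_flatter (starmap : List (String × List String)) (out : List (String × List String)) : Prop := out = map_flatter_alt starmap
instance (starmap : List (String × List String)) (out : List (String × List String)) : Decidable (Spec_map_flatter starmap out) := by unfold Spec_map_flatter; infer_instance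

-- ===== CLAIM (what is proved, stated in full; the proofs are below) =====
def Claim_equal_map_flatter : Prop := ∀ (starmap : List (String × List String)), Dom_map_flatter starmap → Pre_map_flatter starmap → Spec_map_flatter starmap (map_flatter starmap)

-- ===== LEMMAS AND PROOFS =====

-- flag-free version of the inner-loop body / of one sweep (proof-side)
def stepB (sm d : PySem.Dict String (List String)) (node : String) :
    PySem.Dict String (List String) :=
  if (d.get? node).isSome then d
  else
    let cs := (sm.get? node).getD []
    if cs.all (fun c => (d.get? c).isSome || (sm.get? c).isNone)
    then d.insert node (cs ++ cs.flatMap (fun c => (d.get? c).getD []))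
    else d

def sweepB (sm d : PySem.Dict String (List String)) : PySem.Dict String (List String) :=
  sm.keys.foldl (stepB sm) d

-- the invariant carried through B's sweeps: keys are distinct keys of sm, and the
-- entry at position i holds flat_map of its key (for any fuel above i)
def InvItems (sm : PySem.Dict String (List String))
    (l : List (String × List String)) : Prop :=
  ∀ i (h : i < l.length),
    (l[i]).1 ∈ sm.keys ∧ ∀ F, i + 1 ≤ F → flatA sm F (l[i]).1 = (l[i]).2

def InvD (sm d : PySem.Dict String (List String)) : Prop :=
  d.keys.Nodup ∧ InvItems sm d.items

theorem flatA_nonkey (sm : PySem.Dict String (List String)) (c : String)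
    (h : sm.get? c = none) : ∀ F, flatA sm F c = [] := by
  intro F; cases F <;> simp [flatA, h]

theorem flatMap_congr_mem {α β : Type} (l : List α) (f g : α → List β)
    (h : ∀ x ∈ l, f x = g x) : l.flatMap f = l.flatMap g := by
  induction l with
  | nil => rfl
  | cons x xs ih =>
      simp only [List.flatMap_cons, h x (List.mem_cons_self),
        ih (fun y hy => h y (List.mem_cons_of_mem _ hy))]

-- generic foldl invariant
theorem foldl_inv {α β : Type} (P : β → Prop) (f : β → α → β) (l : List α) (b : β)
    (h : ∀ b a, a ∈ l → P b → P (f b a)) (hb : P b) : P (l.foldl f b) := by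
  induction l generalizing b with
  | nil => exact hb
  | cons x xs ih =>
      exact ih _ (fun b a ha hb => h b a (List.mem_cons_of_mem _ ha) hb)
        (h b x List.mem_cons_self hb)

theorem get?_isSome_iff_mem {d : PySem.Dict String (List String)} {k : String} :
    (d.get? k).isSome = true ↔ k ∈ d.keys := by
  rw [Option.isSome_iff_ne_none]
  constructor
  · intro h
    by_contra hm
    exact h ((PySem.Dict.get?_eq_none_iff_not_mem_keys d k).mpr hm)
  · intro h hn
    exact (PySem.Dict.get?_eq_none_iff_not_mem_keys d k).mp hn h

theorem keys_length (d : PySem.Dict String (List String)) : d.keys.length = d.size := by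
  simp [PySem.Dict.keys, PySem.Dict.size]

-- ----- closure lemmas -----

theorem chF_subset_keys (sm : PySem.Dict String (List String)) (x : String) :
    chF sm x ⊆ sm.keys.toFinset := by
  intro c hc
  simp only [chF, List.mem_toFinset, List.mem_filter] at hc
  exact List.mem_toFinset.mpr (get?_isSome_iff_mem.mp hc.2)

theorem subset_growF (sm : PySem.Dict String (List String)) (S : Finset String) :
    S ⊆ growF sm S := Finset.subset_union_left

theorem growF_subset_keys (sm : PySem.Dict String (List String)) (S : Finset String)
    (h : S ⊆ sm.keys.toFinset) : growF sm S ⊆ sm.keys.toFinset :=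
  Finset.union_subset h (Finset.biUnion_subset.mpr (fun x _ => chF_subset_keys sm x))

theorem iterate_growF_subset_keys (sm : PySem.Dict String (List String)) (n : Nat)
    (S : Finset String) (h : S ⊆ sm.keys.toFinset) :
    (growF sm)^[n] S ⊆ sm.keys.toFinset := by
  induction n generalizing S with
  | zero => exact h
  | succ n ih => rw [Function.iterate_succ_apply]; exact ih _ (growF_subset_keys sm S h)

theorem subset_iterate_growF (sm : PySem.Dict String (List String)) (n : Nat)
    (S : Finset String) : S ⊆ (growF sm)^[n] S := by
  induction n with
  | zero => exact subset_refl S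
  | succ n ih =>
      rw [Function.iterate_succ_apply']
      exact subset_trans ih (subset_growF sm _)

theorem reachF_fixed (sm : PySem.Dict String (List String)) (x : String) :
    growF sm (reachF sm x) = reachF sm x := by
  by_cases hex : ∃ j ≤ sm.size, growF sm ((growF sm)^[j] (chF sm x)) = (growF sm)^[j] (chF sm x)
  · obtain ⟨j, hj, hfix⟩ := hex
    have hstep : ∀ m, (growF sm)^[j + m] (chF sm x) = (growF sm)^[j] (chF sm x) := by
      intro m
      rw [Nat.add_comm, Function.iterate_add_apply]
      exact Function.iterate_fixed hfix m
    have hN : reachF sm x = (growF sm)^[j] (chF sm x) := by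
      have := hstep (sm.size - j)
      rw [Nat.add_sub_cancel' hj] at this
      exact this
    rw [hN, hfix]
  · exfalso
    push_neg at hex
    have hcard : ∀ i, i ≤ sm.size + 1 → i ≤ ((growF sm)^[i] (chF sm x)).card := by
      intro i
      induction i with
      | zero => intro _; exact Nat.zero_le _
      | succ i ih =>
          intro hi
          have h1 := ih (by omega)
          have hss : (growF sm)^[i] (chF sm x) ⊂ (growF sm)^[i+1] (chF sm x) := by
            rw [Function.iterate_succ_apply']
            exact ⟨subset_growF sm _, fun habs =>
              hex i (by omega) (Finset.Subset.antisymm habs (subset_growF sm _))⟩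
          have := Finset.card_lt_card hss
          omega
    have h1 := hcard (sm.size + 1) le_rfl
    have h2 : ((growF sm)^[sm.size + 1] (chF sm x)).card ≤ sm.keys.toFinset.card :=
      Finset.card_le_card (iterate_growF_subset_keys sm _ _ (chF_subset_keys sm x))
    have h3 : sm.keys.toFinset.card ≤ sm.size := by
      calc sm.keys.toFinset.card ≤ sm.keys.length := List.toFinset_card_le _
        _ = sm.size := keys_length sm
    omega

theorem chF_subset_reachF_of_mem (sm : PySem.Dict String (List String)) {x y : String}
    (h : y ∈ reachF sm x) : chF sm y ⊆ reachF sm x := by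
  intro c hc
  rw [← reachF_fixed sm x]
  exact Finset.mem_union_right _ (Finset.mem_biUnion.mpr ⟨y, h, hc⟩)

theorem chF_subset_reachF (sm : PySem.Dict String (List String)) (x : String) :
    chF sm x ⊆ reachF sm x := subset_iterate_growF sm _ _

theorem reachF_trans (sm : PySem.Dict String (List String)) {x c : String}
    (hc : c ∈ reachF sm x) : reachF sm c ⊆ reachF sm x := by
  have aux : ∀ n, (growF sm)^[n] (chF sm c) ⊆ reachF sm x := by
    intro n
    induction n with
    | zero => exact chF_subset_reachF_of_mem sm hc
    | succ n ih =>
        rw [Function.iterate_succ_apply']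
        exact Finset.union_subset ih (Finset.biUnion_subset.mpr
          (fun z hz => chF_subset_reachF_of_mem sm (ih hz)))
  exact aux sm.size

theorem ready_aux (sm : PySem.Dict String (List String))
    (hacyc : ∀ k ∈ sm.keys, k ∉ reachF sm k) (D : Finset String) :
    ∀ n (x : String), x ∈ sm.keys → x ∉ D → ((reachF sm x) \ D).card ≤ n →
    ∃ y, y ∈ sm.keys ∧ y ∉ D ∧ chF sm y ⊆ D := by
  intro n
  induction n with
  | zero =>
      intro x hx hxD hcard
      by_cases hch : chF sm x ⊆ D
      · exact ⟨x, hx, hxD, hch⟩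
      · exfalso
        obtain ⟨c, hc, hcD⟩ := Finset.not_subset.mp hch
        have : c ∈ reachF sm x \ D := Finset.mem_sdiff.mpr ⟨chF_subset_reachF sm x hc, hcD⟩
        have := Finset.card_pos.mpr ⟨c, this⟩
        omega
  | succ n ih =>
      intro x hx hxD hcard
      by_cases hch : chF sm x ⊆ D
      · exact ⟨x, hx, hxD, hch⟩
      · obtain ⟨c, hc, hcD⟩ := Finset.not_subset.mp hch
        have hck : c ∈ sm.keys := List.mem_toFinset.mp (chF_subset_keys sm x hc)
        have hcr : c ∈ reachF sm x := chF_subset_reachF sm x hc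
        have hsub : reachF sm c \ D ⊆ reachF sm x \ D :=
          Finset.sdiff_subset_sdiff (reachF_trans sm hcr) (subset_refl D)
        have hss : reachF sm c \ D ⊂ reachF sm x \ D :=
          ⟨hsub, fun habs => hacyc c hck
            (Finset.mem_sdiff.mp (habs (Finset.mem_sdiff.mpr ⟨hcr, hcD⟩))).1⟩
        have := Finset.card_lt_card hss
        exact ih c hck hcD (by omega)

-- ----- stepB / sweepB lemmas -----

theorem stepB_get?_mono (sm d : PySem.Dict String (List String)) (node k : String)
    (v : List String) (h : d.get? k = some v) : (stepB sm d node).get? k = some v := by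
  unfold stepB
  by_cases h1 : (d.get? node).isSome
  · simp [h1, h]
  · have hne : k ≠ node := fun he => h1 (by rw [← he]; simp [h])
    by_cases h2 : ((sm.get? node).getD []).all
        (fun c => (d.get? c).isSome || (sm.get? c).isNone)
    · simp only [h1, h2, if_true, if_false, Bool.false_eq_true]
      rw [PySem.Dict.get?_insert_of_ne _ _ hne]
      exact h
    · simp [h1, h2, h]

theorem stepB_length_mono (sm d : PySem.Dict String (List String)) (node : String) :
    d.items.length ≤ (stepB sm d node).items.length := by
  unfold stepB
  by_cases h1 : (d.get? node).isSome
  · simp [h1]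
  · by_cases h2 : ((sm.get? node).getD []).all
        (fun c => (d.get? c).isSome || (sm.get? c).isNone)
    · simp only [h1, h2, if_true, if_false, Bool.false_eq_true]
      rw [PySem.Dict.items_insert_of_not_contains]
      · simp
      · rw [PySem.Dict.contains_eq_isSome_get?]
        simpa using h1
    · simp [h1, h2]

theorem keys_subset_of_inv {sm d : PySem.Dict String (List String)} (hInv : InvD sm d) :
    ∀ k ∈ d.keys, k ∈ sm.keys := by
  intro k hk
  have : k ∈ d.items.map Prod.fst := by simpa [PySem.Dict.keys] using hk
  obtain ⟨p, hp, hpk⟩ := List.mem_map.mp this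
  obtain ⟨i, hi, hie⟩ := List.mem_iff_getElem.mp hp
  have := (hInv.2 i hi).1
  rw [hie] at this
  rwa [hpk] at this

theorem get?_entry_of_inv {sm d : PySem.Dict String (List String)} (_hInv : InvD sm d)
    {k : String} {v : List String} (h : d.get? k = some v) :
    ∃ i, ∃ (hi : i < d.items.length), d.items[i] = (k, v) := by
  have hmem : (k, v) ∈ d.items := PySem.Dict.mem_items_of_get?_eq_some _ h
  obtain ⟨i, hi, hie⟩ := List.mem_iff_getElem.mp hmem
  exact ⟨i, hi, hie⟩

theorem stepB_inv (sm d : PySem.Dict String (List String)) (node : String)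
    (hnode : node ∈ sm.keys) (hInv : InvD sm d) : InvD sm (stepB sm d node) := by
  unfold stepB
  by_cases h1 : (d.get? node).isSome
  · simpa [h1] using hInv
  · by_cases h2 : ((sm.get? node).getD []).all
        (fun c => (d.get? c).isSome || (sm.get? c).isNone)
    · simp only [h1, h2, if_true, if_false, Bool.false_eq_true]
      have hfresh : d.contains node = false := by
        rw [PySem.Dict.contains_eq_isSome_get?]; simpa using h1
      have hnmem : node ∉ d.keys := by
        intro hm
        exact h1 (get?_isSome_iff_mem.mpr hm)
      obtain ⟨cs0, hcs0⟩ : ∃ cs0, sm.get? node = some cs0 :=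
        Option.isSome_iff_exists.mp (get?_isSome_iff_mem.mpr hnode)
      have hitems := PySem.Dict.items_insert_of_not_contains
        (d := d) (k := node)
        (v := ((sm.get? node).getD []) ++ ((sm.get? node).getD []).flatMap
          (fun c => (d.get? c).getD [])) hfresh
      constructor
      · rw [PySem.Dict.keys_insert_of_not_contains _ _ hfresh]
        simpa [List.nodup_append] using ⟨hInv.1, fun a ha (he : a = node) => hnmem (he ▸ ha)⟩
      · show InvItems sm _
        rw [hitems]
        intro i hi
        simp only [List.length_append, List.length_cons, List.length_nil] at hi
        by_cases hlt : i < d.items.length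
        · rw [List.getElem_append_left hlt]
          exact hInv.2 i hlt
        · have hieq : i = d.items.length := by omega
          subst hieq
          rw [List.getElem_append_right (le_refl _)]
          simp only [Nat.sub_self, List.getElem_cons_zero]
          refine ⟨hnode, ?_⟩
          intro F hF
          obtain ⟨F', rfl⟩ : ∃ F', F = F' + 1 := ⟨F - 1, by omega⟩
          rw [hcs0] at h2 ⊢
          simp only [Option.getD_some] at h2 ⊢
          simp only [flatA, hcs0]
          congr 1
          apply flatMap_congr_mem
          intro c hcmem
          have hall := (List.all_eq_true.mp h2) c hcmem
          simp only [Bool.or_eq_true] at hall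
          rcases hall with hsome | hnone
          · obtain ⟨w, hw⟩ := Option.isSome_iff_exists.mp hsome
            obtain ⟨j, hj, hje⟩ := get?_entry_of_inv hInv hw
            have hval := (hInv.2 j hj).2 F' (by omega)
            rw [hje] at hval
            simp only at hval
            rw [hw]
            simpa using hval
          · have hcnone : sm.get? c = none := Option.isNone_iff_eq_none.mp hnone
            have hdnone : d.get? c = none := by
              rw [PySem.Dict.get?_eq_none_iff_not_mem_keys]
              intro hcd
              have hck := keys_subset_of_inv hInv c hcd
              have := get?_isSome_iff_mem.mpr hck
              rw [hcnone] at this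
              simp at this
            rw [flatA_nonkey sm c hcnone F', hdnone]
            rfl
    · simpa [h1, h2] using hInv

theorem sweepB_inv (sm d : PySem.Dict String (List String)) (hInv : InvD sm d) :
    InvD sm (sweepB sm d) :=
  foldl_inv (InvD sm) (stepB sm) sm.keys d
    (fun b a ha hb => stepB_inv sm b a ha hb) hInv

theorem foldl_stepB_get?_mono (sm : PySem.Dict String (List String)) (l : List String)
    (d : PySem.Dict String (List String)) (k : String) (v : List String)
    (h : d.get? k = some v) : (l.foldl (stepB sm) d).get? k = some v :=
  foldl_inv (fun d' => d'.get? k = some v) (stepB sm) l d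
    (fun b a _ hb => stepB_get?_mono sm b a k v hb) h

theorem foldl_stepB_length_mono (sm : PySem.Dict String (List String)) (l : List String)
    (d : PySem.Dict String (List String)) (n : Nat) (h : n ≤ d.items.length) :
    n ≤ (l.foldl (stepB sm) d).items.length :=
  foldl_inv (fun d' => n ≤ d'.items.length) (stepB sm) l d
    (fun b a _ hb => le_trans hb (stepB_length_mono sm b a)) h

theorem foldl_stepB_inv (sm : PySem.Dict String (List String)) (l : List String)
    (hl : ∀ a ∈ l, a ∈ sm.keys) (d : PySem.Dict String (List String)) (hInv : InvD sm d) :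
    InvD sm (l.foldl (stepB sm) d) :=
  foldl_inv (InvD sm) (stepB sm) l d (fun b a ha hb => stepB_inv sm b a (hl a ha) hb) hInv

theorem sweep_progress (sm : PySem.Dict String (List String)) (_hnd : sm.keys.Nodup)
    (hacyc : ∀ k ∈ sm.keys, k ∉ reachF sm k) (d : PySem.Dict String (List String))
    (hInv : InvD sm d) (k : String) (hk : k ∈ sm.keys) (hkd : d.get? k = none) :
    d.items.length + 1 ≤ (sweepB sm d).items.length := by
  have hkD : k ∉ d.keys.toFinset := by
    rw [List.mem_toFinset]
    exact (PySem.Dict.get?_eq_none_iff_not_mem_keys d k).mp hkd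
  obtain ⟨y, hy, hyD, hch⟩ :=
    ready_aux sm hacyc d.keys.toFinset ((reachF sm k \ d.keys.toFinset).card) k hk hkD le_rfl
  obtain ⟨l, r, hsplit⟩ := List.append_of_mem hy
  unfold sweepB
  rw [hsplit, List.foldl_append, List.foldl_cons]
  set d1 := l.foldl (stepB sm) d with hd1
  have hmono : ∀ kk vv, d.get? kk = some vv → d1.get? kk = some vv :=
    fun kk vv h => foldl_stepB_get?_mono sm l d kk vv h
  have hd1inv : InvD sm d1 :=
    foldl_stepB_inv sm l (fun a ha => by rw [hsplit]; exact List.mem_append_left _ ha) d hInv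
  have hlen1 : d.items.length ≤ d1.items.length := foldl_stepB_length_mono sm l d _ le_rfl
  have hynotd : y ∉ d.keys := by rwa [List.mem_toFinset] at hyD
  by_cases hy1 : (d1.get? y).isSome
  · -- y was filled during the l-prefix: the dict already grew by one
    apply foldl_stepB_length_mono
    refine le_trans ?_ (stepB_length_mono sm d1 y)
    calc d.items.length + 1
        = d.keys.toFinset.card + 1 := by
          rw [List.toFinset_card_of_nodup hInv.1, PySem.Dict.keys, List.length_map]
      _ = (insert y d.keys.toFinset).card := by
          rw [Finset.card_insert_of_notMem hyD]
      _ ≤ d1.keys.toFinset.card := by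
          apply Finset.card_le_card
          intro z hz
          rw [Finset.mem_insert] at hz
          rw [List.mem_toFinset]
          rcases hz with rfl | hz
          · exact get?_isSome_iff_mem.mp hy1
          · rw [List.mem_toFinset] at hz
            obtain ⟨w, hw⟩ := Option.isSome_iff_exists.mp (get?_isSome_iff_mem.mpr hz)
            exact get?_isSome_iff_mem.mp (by simp [hmono z w hw])
      _ = d1.keys.length := List.toFinset_card_of_nodup hd1inv.1
      _ = d1.items.length := by rw [PySem.Dict.keys, List.length_map]
  · -- y is still missing and, by readiness, gets inserted now
    apply foldl_stepB_length_mono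
    have hy1n : d1.get? y = none := by
      cases hc : d1.get? y
      · rfl
      · rw [hc] at hy1; simp at hy1
    have hready : ((sm.get? y).getD []).all
        (fun c => (d1.get? c).isSome || (sm.get? c).isNone) = true := by
      rw [List.all_eq_true]
      intro c hcmem
      by_cases hcs : (sm.get? c).isSome
      · have hcch : c ∈ chF sm y := by
          simp only [chF, List.mem_toFinset, List.mem_filter]
          exact ⟨hcmem, hcs⟩
        have hcD := hch hcch
        rw [List.mem_toFinset] at hcD
        obtain ⟨w, hw⟩ := Option.isSome_iff_exists.mp (get?_isSome_iff_mem.mpr hcD)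
        simp [hmono c w hw]
      · simp [Option.not_isSome_iff_eq_none.mp hcs]
    unfold stepB
    simp only [hy1n, Option.isSome_none, Bool.false_eq_true, if_false, hready, if_true]
    rw [PySem.Dict.items_insert_of_not_contains]
    · simp only [List.length_append, List.length_cons, List.length_nil]
      omega
    · rw [PySem.Dict.contains_eq_isSome_get?, hy1n]; rfl

-- the dict after i sweeps
def roundsD (sm : PySem.Dict String (List String)) (i : Nat) :
    PySem.Dict String (List String) :=
  (List.range i).foldl (fun d _ => sweepB sm d) PySem.Dict.empty

theorem roundsD_succ (sm : PySem.Dict String (List String)) (i : Nat) :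
    roundsD sm (i + 1) = sweepB sm (roundsD sm i) := by
  unfold roundsD
  rw [List.range_succ, List.foldl_append, List.foldl_cons, List.foldl_nil]

theorem roundsD_inv (sm : PySem.Dict String (List String)) (hnd : sm.keys.Nodup)
    (hacyc : ∀ k ∈ sm.keys, k ∉ reachF sm k) :
    ∀ i, InvD sm (roundsD sm i) ∧ min i sm.size ≤ (roundsD sm i).items.length := by
  intro i
  induction i with
  | zero =>
      have h0 : roundsD sm 0 = PySem.Dict.empty := rfl
      have he : (PySem.Dict.empty : PySem.Dict String (List String)).items = [] := rfl
      rw [h0]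
      refine ⟨⟨?_, ?_⟩, ?_⟩
      · show (PySem.Dict.empty.items.map _).Nodup
        rw [he]; exact List.nodup_nil
      · intro j hj
        rw [he] at hj
        exact absurd hj (by simp)
      · rw [he]; simp
  | succ i ih =>
      obtain ⟨hInv, hlen⟩ := ih
      refine ⟨by rw [roundsD_succ]; exact sweepB_inv sm _ hInv, ?_⟩
      rw [roundsD_succ]
      by_cases hall : ∀ k ∈ sm.keys, ((roundsD sm i).get? k).isSome
      · -- everything already filled: length is already sm.size
        have hsub : sm.keys.toFinset ⊆ (roundsD sm i).keys.toFinset := by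
          intro z hz
          rw [List.mem_toFinset] at hz ⊢
          exact get?_isSome_iff_mem.mp (hall z hz)
        have : sm.size ≤ (roundsD sm i).items.length := by
          calc sm.size = sm.keys.length := (keys_length sm).symm
            _ = sm.keys.toFinset.card := (List.toFinset_card_of_nodup hnd).symm
            _ ≤ (roundsD sm i).keys.toFinset.card := Finset.card_le_card hsub
            _ ≤ (roundsD sm i).keys.length := List.toFinset_card_le _
            _ = (roundsD sm i).items.length := by rw [PySem.Dict.keys, List.length_map]
        have hmono : (roundsD sm i).items.length ≤ (sweepB sm (roundsD sm i)).items.length :=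
          foldl_stepB_length_mono sm _ _ _ le_rfl
        omega
      · push_neg at hall
        obtain ⟨k, hk, hkn⟩ := hall
        have hknone : (roundsD sm i).get? k = none :=
          Option.not_isSome_iff_eq_none.mp hkn
        have := sweep_progress sm hnd hacyc (roundsD sm i) hInv k hk hknone
        omega

theorem desc_value (sm : PySem.Dict String (List String)) (hnd : sm.keys.Nodup)
    (hacyc : ∀ k ∈ sm.keys, k ∉ reachF sm k) (k : String) (hk : k ∈ sm.keys) :
    ((roundsD sm sm.size).get? k).getD [] = flatA sm (sm.size + 1) k := by
  obtain ⟨hInv, hlen⟩ := roundsD_inv sm hnd hacyc sm.size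
  rw [min_self] at hlen
  set dN := roundsD sm sm.size with hdN
  have hsubkeys : dN.keys.toFinset ⊆ sm.keys.toFinset := by
    intro z hz
    rw [List.mem_toFinset] at hz ⊢
    exact keys_subset_of_inv hInv z hz
  have hlenle : dN.items.length ≤ sm.size := by
    calc dN.items.length = dN.keys.length := by rw [PySem.Dict.keys, List.length_map]
      _ = dN.keys.toFinset.card := (List.toFinset_card_of_nodup hInv.1).symm
      _ ≤ sm.keys.toFinset.card := Finset.card_le_card hsubkeys
      _ = sm.keys.length := List.toFinset_card_of_nodup hnd
      _ = sm.size := keys_length sm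
  have hkeyseq : dN.keys.toFinset = sm.keys.toFinset := by
    apply Finset.eq_of_subset_of_card_le hsubkeys
    calc sm.keys.toFinset.card = sm.keys.length := List.toFinset_card_of_nodup hnd
      _ = sm.size := keys_length sm
      _ ≤ dN.items.length := hlen
      _ = dN.keys.length := by rw [PySem.Dict.keys, List.length_map]
      _ = dN.keys.toFinset.card := (List.toFinset_card_of_nodup hInv.1).symm
  have hkmem : k ∈ dN.keys := by
    rw [← List.mem_toFinset, hkeyseq, List.mem_toFinset]; exact hk
  obtain ⟨v, hv⟩ := Option.isSome_iff_exists.mp (get?_isSome_iff_mem.mpr hkmem)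
  obtain ⟨i, hi, hie⟩ := get?_entry_of_inv hInv hv
  have hval := (hInv.2 i hi).2 (sm.size + 1) (by omega)
  rw [hie] at hval
  simp only at hval
  rw [hv]
  simpa using hval.symm

theorem foldl_insert_congr {ν : Type} (l : List String) (f g : String → ν)
    (h : ∀ k ∈ l, f k = g k) (acc : PySem.Dict String ν) :
    l.foldl (fun d k => d.insert k (f k)) acc = l.foldl (fun d k => d.insert k (g k)) acc := by
  induction l generalizing acc with
  | nil => rfl
  | cons x xs ih =>
      simp only [List.foldl_cons]
      rw [h x List.mem_cons_self]
      exact ih (fun k hk => h k (List.mem_cons_of_mem _ hk)) _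

theorem stepB2_fst (sm : PySem.Dict String (List String))
    (st : PySem.Dict String (List String) × Bool) (node : String) :
    (stepB2 sm st node).1 = stepB sm st.1 node := by
  unfold stepB2 stepB
  by_cases h1 : (st.1.get? node).isSome
  · simp [h1]
  · by_cases h2 : ((sm.get? node).getD []).all
        (fun c => (st.1.get? c).isSome || (sm.get? c).isNone)
    · simp [h1, h2]
    · simp [h1, h2]

theorem stepB2_noflag (sm : PySem.Dict String (List String))
    (st : PySem.Dict String (List String) × Bool) (node : String)
    (h : (stepB2 sm st node).2 = false) :
    stepB2 sm st node = st ∧ stepB sm st.1 node = st.1 := by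
  unfold stepB2 at h ⊢
  unfold stepB
  by_cases h1 : (st.1.get? node).isSome
  · simp [h1]
  · by_cases h2 : ((sm.get? node).getD []).all
        (fun c => (st.1.get? c).isSome || (sm.get? c).isNone)
    · simp [h1, h2] at h
    · simp [h1, h2]

theorem foldl2_fst (sm : PySem.Dict String (List String)) (l : List String)
    (st : PySem.Dict String (List String) × Bool) :
    (l.foldl (stepB2 sm) st).1 = l.foldl (stepB sm) st.1 := by
  induction l generalizing st with
  | nil => rfl
  | cons x xs ih => simp only [List.foldl_cons]; rw [ih, stepB2_fst]

theorem foldl2_noflag (sm : PySem.Dict String (List String)) (l : List String)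
    (st : PySem.Dict String (List String) × Bool)
    (h : (l.foldl (stepB2 sm) st).2 = false) :
    l.foldl (stepB sm) st.1 = st.1 ∧ st.2 = false := by
  induction l generalizing st with
  | nil => exact ⟨rfl, h⟩
  | cons x xs ih =>
      simp only [List.foldl_cons] at h ⊢
      obtain ⟨hfold, hflag⟩ := ih (stepB2 sm st x) h
      obtain ⟨heq, hstep⟩ := stepB2_noflag sm st x hflag
      rw [hstep]
      rw [heq] at hfold
      exact ⟨hfold, by rw [heq] at hflag; exact hflag⟩

-- the flagged outer loop of the port computes exactly roundsD
theorem loopB_spec (sm : PySem.Dict String (List String)) :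
    ∀ i, ((List.range i).foldl
      (fun st _ => if st.2 then st
        else
          let r := sm.keys.foldl (stepB2 sm) (st.1, false)
          (r.1, !r.2))
      (PySem.Dict.empty, false)).1 = roundsD sm i ∧
      (((List.range i).foldl
      (fun st _ => if st.2 then st
        else
          let r := sm.keys.foldl (stepB2 sm) (st.1, false)
          (r.1, !r.2))
      (PySem.Dict.empty, false)).2 = true → sweepB sm (roundsD sm i) = roundsD sm i) := by
  intro i
  induction i with
  | zero => exact ⟨rfl, by intro h; simp at h⟩
  | succ i ih =>
      obtain ⟨h1, h2⟩ := ih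
      rw [List.range_succ, List.foldl_append, List.foldl_cons, List.foldl_nil]
      set st := (List.range i).foldl
        (fun st _ => if st.2 then st
          else
            let r := sm.keys.foldl (stepB2 sm) (st.1, false)
            (r.1, !r.2))
        (PySem.Dict.empty, false) with hst
      by_cases hs : st.2
      · have hround : roundsD sm (i + 1) = roundsD sm i := by
          rw [roundsD_succ]; exact h2 hs
        simp only [hs, if_true]
        refine ⟨by rw [h1, hround], ?_⟩
        intro _
        rw [hround]
        exact h2 hs
      · simp only [hs, if_false, Bool.false_eq_true]
        constructor
        · show (sm.keys.foldl (stepB2 sm) (st.1, false)).1 = roundsD sm (i + 1)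
          rw [foldl2_fst, roundsD_succ, h1]
          rfl
        · intro hflag
          simp only [Bool.not_eq_true'] at hflag
          have hnop := (foldl2_noflag sm sm.keys (st.1, false) hflag).1
          have hsw : sweepB sm (roundsD sm i) = roundsD sm i := by
            rw [← h1]; exact hnop
          have hround : roundsD sm (i + 1) = roundsD sm i := by
            rw [roundsD_succ]; exact hsw
          rw [hround]
          exact hsw

theorem main_aux (sm : PySem.Dict String (List String)) (hnd : sm.keys.Nodup)
    (hacyc : ∀ k ∈ sm.keys, k ∉ reachF sm k) :
    (sm.keys.foldl (fun d k => d.insert k (flatA sm (sm.size + 1) k)) PySem.Dict.empty).items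
      = (sm.keys.foldl (fun out k => out.insert k
          (((((List.range sm.size).foldl
            (fun st _ => if st.2 then st
              else
                let r := sm.keys.foldl (stepB2 sm) (st.1, false)
                (r.1, !r.2))
            (PySem.Dict.empty, false)).1).get? k).getD []))
          PySem.Dict.empty).items := by
  rw [(loopB_spec sm sm.size).1]
  congr 1
  apply foldl_insert_congr
  intro k hk
  exact (desc_value sm hnd hacyc k hk).symm

-- ===== VERDICT (by name: the statement is the Claim_ definition above) =====
theorem map_flatter_spec : Claim_equal_map_flatter := by
  intro starmap _ hpre
  obtain ⟨hnd, hacyc⟩ := hpre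
  unfold Spec_map_flatter
  exact main_aux (PySem.Dict.mk starmap) hnd hacyc
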